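-- pv_equiv track=rewrite | github.com/sulaimonao/self_hosted_search_engine | seed_loader/curate.py | _guess_region
-- ===== SOURCE A (Python) =====
-- _REGION_HINTS = {
--     "us": {".us", ".gov", ".mil", ".edu"},
--     "eu": {".fr", ".de", ".es", ".pt", ".it", ".ie", ".pl", ".nl", ".se", ".no"},
--     "latam": {".br", ".mx", ".ar", ".cl", ".pe", ".co"},
--     "apac": {".jp", ".cn", ".sg", ".au", ".in", ".kr", ".hk"},
-- }
--
-- def _guess_region(domain: str) -> str:
--     lowered = domain.lower()
--     for region, suffixes in _REGION_HINTS.items():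
--         if any(lowered.endswith(suffix) for suffix in suffixes):
--             return region
--     if lowered.endswith(".uk") or lowered.endswith(".ie"):
--         return "eu"
--     if lowered.endswith(".ca"):
--         return "na"
--     return "us"
-- ===== SOURCE B (Python) =====
-- _SUFFIX_TO_REGION = {
--     ".us": "us", ".gov": "us", ".mil": "us", ".edu": "us",
--     ".fr": "eu", ".de": "eu", ".es": "eu", ".pt": "eu", ".it": "eu",
--     ".ie": "eu", ".pl": "eu", ".nl": "eu", ".se": "eu", ".no": "eu",
--     ".br": "latam", ".mx": "latam", ".ar": "latam", ".cl": "latam",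
--     ".pe": "latam", ".co": "latam",
--     ".jp": "apac", ".cn": "apac", ".sg": "apac", ".au": "apac",
--     ".in": "apac", ".kr": "apac", ".hk": "apac",
--     ".uk": "eu", ".ca": "na",
-- }
--
-- def _guess_region(domain: str) -> str:
--     lowered = domain.lower()
--     tail = []
--     for ch in reversed(lowered):
--         tail.append(ch)
--         if ch == ".":
--             return _SUFFIX_TO_REGION.get("".join(reversed(tail)), "us")
--     return "us"
-- ===== Notes on version B (the rewrite author's own statement) =====
-- stated objective: idiomatic
-- what changed: Replaced A's nested region/suffix scan (4 regions x up to 10 endswith checks, plus trailing special cases) by a single backward pass that cuts the final dot-delimited suffix off the lowered string and looks it up once in a flat suffix-to-region dict.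
import Mathlib
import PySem

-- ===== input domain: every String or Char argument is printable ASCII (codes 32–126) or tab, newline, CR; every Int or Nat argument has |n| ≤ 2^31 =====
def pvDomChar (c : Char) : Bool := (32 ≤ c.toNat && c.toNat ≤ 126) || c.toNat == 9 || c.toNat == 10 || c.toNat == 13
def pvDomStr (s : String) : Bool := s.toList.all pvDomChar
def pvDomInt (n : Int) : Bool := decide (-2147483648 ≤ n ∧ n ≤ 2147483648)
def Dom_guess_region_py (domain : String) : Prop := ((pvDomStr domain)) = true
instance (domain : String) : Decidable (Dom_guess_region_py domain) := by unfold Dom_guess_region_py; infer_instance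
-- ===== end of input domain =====

-- B replaces A's nested region/suffix endswith scan by one backward pass that cuts the
-- final '.'-suffix and looks it up in a flat suffix→region table (objective: idiomatic).

-- ===== PORT A =====
def pvRegionHints : List (String × List String) :=
  [("us", [".us", ".gov", ".mil", ".edu"]),
   ("eu", [".fr", ".de", ".es", ".pt", ".it", ".ie", ".pl", ".nl", ".se", ".no"]),
   ("latam", [".br", ".mx", ".ar", ".cl", ".pe", ".co"]),
   ("apac", [".jp", ".cn", ".sg", ".au", ".in", ".kr", ".hk"])]

def guess_region_py (domain : String) : String :=
  let lowered := PySem.Str.lower domain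
  match pvRegionHints.find? (fun p => p.2.any (fun suffix => PySem.Str.endswith lowered suffix)) with
  | some p => p.1
  | none =>
    if PySem.Str.endswith lowered ".uk" || PySem.Str.endswith lowered ".ie" then "eu"
    else if PySem.Str.endswith lowered ".ca" then "na"
    else "us"

-- ===== PORT B =====
def pvSuffixToRegion : PySem.Dict String String :=
  PySem.Dict.ofList
    [(".us", "us"), (".gov", "us"), (".mil", "us"), (".edu", "us"),
     (".fr", "eu"), (".de", "eu"), (".es", "eu"), (".pt", "eu"), (".it", "eu"),
     (".ie", "eu"), (".pl", "eu"), (".nl", "eu"), (".se", "eu"), (".no", "eu"),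
     (".br", "latam"), (".mx", "latam"), (".ar", "latam"), (".cl", "latam"),
     (".pe", "latam"), (".co", "latam"),
     (".jp", "apac"), (".cn", "apac"), (".sg", "apac"), (".au", "apac"),
     (".in", "apac"), (".kr", "apac"), (".hk", "apac"),
     (".uk", "eu"), (".ca", "na")]

-- the 'for ch in reversed(lowered)' loop of B: r = the not-yet-seen reversed prefix,
-- acc = the suffix accumulated so far (as chars)
def pvAltGo (r : List Char) (acc : List Char) : String :=
  match r with
  | [] => "us"
  | c :: r' =>
    let acc' := c :: acc
    if c = '.' then pvSuffixToRegion.getD (String.ofList acc') "us"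
    else pvAltGo r' acc'

def guess_region_py_alt (domain : String) : String :=
  pvAltGo (PySem.Str.lower domain).toList.reverse []

-- ===== PRECONDITION & SPEC =====
def Spec_guess_region_py (domain : String) (out : String) : Prop := out = guess_region_py_alt domain
instance (domain : String) (out : String) : Decidable (Spec_guess_region_py domain out) := by unfold Spec_guess_region_py; infer_instance

-- ===== CLAIM (what is proved, stated in full; the proofs are below) =====
def Claim_equal_guess_region_py : Prop := ∀ (domain : String), Dom_guess_region_py domain → Spec_guess_region_py domain (guess_region_py domain)

-- ===== LEMMAS AND PROOFS =====

-- A's chain, expressed on the lowered character list (guess_region_py domain reduces to this)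
def pvChainA (l : List Char) : String :=
  match pvRegionHints.find? (fun p => p.2.any (fun suffix => PySem.Chars.endswith l suffix.toList)) with
  | some p => p.1
  | none =>
    if PySem.Chars.endswith l ['.', 'u', 'k'] || PySem.Chars.endswith l ['.', 'i', 'e'] then "eu"
    else if PySem.Chars.endswith l ['.', 'c', 'a'] then "na"
    else "us"

lemma pvChainA_eq (domain : String) : guess_region_py domain = pvChainA (PySem.Str.lower domain).toList := by
  simp [guess_region_py, pvChainA, pvRegionHints, List.find?, List.any]

-- a '.'-headed pattern is a suffix of x ++ '.'::acc  iff it is exactly '.'::acc (no dots elsewhere)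
lemma pv_suffix_dot (x acc cs : List Char) (hacc : '.' ∉ acc) (hcs : '.' ∉ cs) :
    ('.' :: cs) <:+ (x ++ '.' :: acc) ↔ cs = acc := by
  constructor
  · intro h
    have h2 : ('.' :: acc) <:+ (x ++ '.' :: acc) := List.suffix_append x _
    rcases List.suffix_or_suffix_of_suffix h h2 with hc | hc
    · rcases List.suffix_cons_iff.mp hc with he | hc
      · exact (List.cons.injEq _ _ _ _ ▸ he).2
      · exact absurd (hc.subset (List.mem_cons_self)) hacc
    · rcases List.suffix_cons_iff.mp hc with he | hc
      · exact ((List.cons.injEq _ _ _ _ ▸ he).2).symm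
      · exact absurd (hc.subset (List.mem_cons_self)) hcs
  · rintro rfl
    exact List.suffix_append x _

lemma pv_ofList_inj {a b : List Char} (h : String.ofList a = String.ofList b) : a = b := by
  simpa using congrArg String.toList h

lemma pv_key_beq (cs acc : List Char) :
    (String.ofList ('.' :: cs) == String.ofList ('.' :: acc)) = decide (cs = acc) := by
  by_cases h : cs = acc
  · simp [h]
  · simp only [h, decide_false, beq_eq_false_iff_ne, ne_eq]
    intro he
    exact h (by simpa using pv_ofList_inj he)

lemma pv_endswith_dot (x acc cs : List Char) (hacc : '.' ∉ acc) (hcs : '.' ∉ cs) :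
    PySem.Chars.endswith (x ++ '.' :: acc) ('.' :: cs) = decide (cs = acc) := by
  cases hb : PySem.Chars.endswith (x ++ '.' :: acc) ('.' :: cs) with
  | true =>
    have := (pv_suffix_dot x acc cs hacc hcs).mp ((PySem.Chars.endswith_iff _ _).mp hb)
    simp [this]
  | false =>
    by_cases h : cs = acc
    · exact absurd hb (by
        simp [(PySem.Chars.endswith_iff _ _).mpr ((pv_suffix_dot x acc cs hacc hcs).mpr h)])
    · simp [h]

-- a dot-free list has no '.'-headed suffix
lemma pv_endswith_no_dot (acc cs : List Char) (hacc : '.' ∉ acc) :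
    PySem.Chars.endswith acc ('.' :: cs) = false := by
  cases hb : PySem.Chars.endswith acc ('.' :: cs) with
  | false => rfl
  | true =>
    exact absurd (((PySem.Chars.endswith_iff _ _).mp hb).subset (List.mem_cons_self)) hacc

lemma pv_items : pvSuffixToRegion.items =
    [(".us", "us"), (".gov", "us"), (".mil", "us"), (".edu", "us"),
     (".fr", "eu"), (".de", "eu"), (".es", "eu"), (".pt", "eu"), (".it", "eu"),
     (".ie", "eu"), (".pl", "eu"), (".nl", "eu"), (".se", "eu"), (".no", "eu"),
     (".br", "latam"), (".mx", "latam"), (".ar", "latam"), (".cl", "latam"),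
     (".pe", "latam"), (".co", "latam"),
     (".jp", "apac"), (".cn", "apac"), (".sg", "apac"), (".au", "apac"),
     (".in", "apac"), (".kr", "apac"), (".hk", "apac"),
     (".uk", "eu"), (".ca", "na")] := by rfl

-- at the moment B's loop meets the last '.', A's whole chain equals the table lookup
lemma pv_dot_case (x acc : List Char) (hacc : '.' ∉ acc) :
    pvChainA (x ++ '.' :: acc) = pvSuffixToRegion.getD (String.ofList ('.' :: acc)) "us" := by
  have e : ∀ cs : List Char, '.' ∉ cs →
      PySem.Chars.endswith (x ++ '.' :: acc) ('.' :: cs) = decide (cs = acc) :=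
    fun cs h => pv_endswith_dot x acc cs hacc h
  simp only [pvChainA, pvRegionHints, List.find?, List.any,
    PySem.Dict.getD, PySem.Dict.get?, pv_items]
  rw [show (".us" : String).toList = '.' :: ['u','s'] from rfl,
      show (".gov" : String).toList = '.' :: ['g','o','v'] from rfl,
      show (".mil" : String).toList = '.' :: ['m','i','l'] from rfl,
      show (".edu" : String).toList = '.' :: ['e','d','u'] from rfl,
      show (".fr" : String).toList = '.' :: ['f','r'] from rfl,
      show (".de" : String).toList = '.' :: ['d','e'] from rfl,
      show (".es" : String).toList = '.' :: ['e','s'] from rfl,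
      show (".pt" : String).toList = '.' :: ['p','t'] from rfl,
      show (".it" : String).toList = '.' :: ['i','t'] from rfl,
      show (".ie" : String).toList = '.' :: ['i','e'] from rfl,
      show (".pl" : String).toList = '.' :: ['p','l'] from rfl,
      show (".nl" : String).toList = '.' :: ['n','l'] from rfl,
      show (".se" : String).toList = '.' :: ['s','e'] from rfl,
      show (".no" : String).toList = '.' :: ['n','o'] from rfl,
      show (".br" : String).toList = '.' :: ['b','r'] from rfl,
      show (".mx" : String).toList = '.' :: ['m','x'] from rfl,
      show (".ar" : String).toList = '.' :: ['a','r'] from rfl,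
      show (".cl" : String).toList = '.' :: ['c','l'] from rfl,
      show (".pe" : String).toList = '.' :: ['p','e'] from rfl,
      show (".co" : String).toList = '.' :: ['c','o'] from rfl,
      show (".jp" : String).toList = '.' :: ['j','p'] from rfl,
      show (".cn" : String).toList = '.' :: ['c','n'] from rfl,
      show (".sg" : String).toList = '.' :: ['s','g'] from rfl,
      show (".au" : String).toList = '.' :: ['a','u'] from rfl,
      show (".in" : String).toList = '.' :: ['i','n'] from rfl,
      show (".kr" : String).toList = '.' :: ['k','r'] from rfl,
      show (".hk" : String).toList = '.' :: ['h','k'] from rfl]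
  rw [e ['u','s'] (by decide), e ['g','o','v'] (by decide), e ['m','i','l'] (by decide),
      e ['e','d','u'] (by decide), e ['f','r'] (by decide), e ['d','e'] (by decide),
      e ['e','s'] (by decide), e ['p','t'] (by decide), e ['i','t'] (by decide),
      e ['i','e'] (by decide), e ['p','l'] (by decide), e ['n','l'] (by decide),
      e ['s','e'] (by decide), e ['n','o'] (by decide), e ['b','r'] (by decide),
      e ['m','x'] (by decide), e ['a','r'] (by decide), e ['c','l'] (by decide),
      e ['p','e'] (by decide), e ['c','o'] (by decide), e ['j','p'] (by decide),
      e ['c','n'] (by decide), e ['s','g'] (by decide), e ['a','u'] (by decide),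
      e ['i','n'] (by decide), e ['k','r'] (by decide), e ['h','k'] (by decide),
      e ['u','k'] (by decide), e ['c','a'] (by decide)]
  rw [show (".us" : String) = String.ofList ('.' :: ['u','s']) from rfl,
      show (".gov" : String) = String.ofList ('.' :: ['g','o','v']) from rfl,
      show (".mil" : String) = String.ofList ('.' :: ['m','i','l']) from rfl,
      show (".edu" : String) = String.ofList ('.' :: ['e','d','u']) from rfl,
      show (".fr" : String) = String.ofList ('.' :: ['f','r']) from rfl,
      show (".de" : String) = String.ofList ('.' :: ['d','e']) from rfl,
      show (".es" : String) = String.ofList ('.' :: ['e','s']) from rfl,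
      show (".pt" : String) = String.ofList ('.' :: ['p','t']) from rfl,
      show (".it" : String) = String.ofList ('.' :: ['i','t']) from rfl,
      show (".ie" : String) = String.ofList ('.' :: ['i','e']) from rfl,
      show (".pl" : String) = String.ofList ('.' :: ['p','l']) from rfl,
      show (".nl" : String) = String.ofList ('.' :: ['n','l']) from rfl,
      show (".se" : String) = String.ofList ('.' :: ['s','e']) from rfl,
      show (".no" : String) = String.ofList ('.' :: ['n','o']) from rfl,
      show (".br" : String) = String.ofList ('.' :: ['b','r']) from rfl,
      show (".mx" : String) = String.ofList ('.' :: ['m','x']) from rfl,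
      show (".ar" : String) = String.ofList ('.' :: ['a','r']) from rfl,
      show (".cl" : String) = String.ofList ('.' :: ['c','l']) from rfl,
      show (".pe" : String) = String.ofList ('.' :: ['p','e']) from rfl,
      show (".co" : String) = String.ofList ('.' :: ['c','o']) from rfl,
      show (".jp" : String) = String.ofList ('.' :: ['j','p']) from rfl,
      show (".cn" : String) = String.ofList ('.' :: ['c','n']) from rfl,
      show (".sg" : String) = String.ofList ('.' :: ['s','g']) from rfl,
      show (".au" : String) = String.ofList ('.' :: ['a','u']) from rfl,
      show (".in" : String) = String.ofList ('.' :: ['i','n']) from rfl,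
      show (".kr" : String) = String.ofList ('.' :: ['k','r']) from rfl,
      show (".hk" : String) = String.ofList ('.' :: ['h','k']) from rfl,
      show (".uk" : String) = String.ofList ('.' :: ['u','k']) from rfl,
      show (".ca" : String) = String.ofList ('.' :: ['c','a']) from rfl,
      pv_key_beq ['u','s'] acc,
      pv_key_beq ['g','o','v'] acc,
      pv_key_beq ['m','i','l'] acc,
      pv_key_beq ['e','d','u'] acc,
      pv_key_beq ['f','r'] acc,
      pv_key_beq ['d','e'] acc,
      pv_key_beq ['e','s'] acc,
      pv_key_beq ['p','t'] acc,
      pv_key_beq ['i','t'] acc,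
      pv_key_beq ['i','e'] acc,
      pv_key_beq ['p','l'] acc,
      pv_key_beq ['n','l'] acc,
      pv_key_beq ['s','e'] acc,
      pv_key_beq ['n','o'] acc,
      pv_key_beq ['b','r'] acc,
      pv_key_beq ['m','x'] acc,
      pv_key_beq ['a','r'] acc,
      pv_key_beq ['c','l'] acc,
      pv_key_beq ['p','e'] acc,
      pv_key_beq ['c','o'] acc,
      pv_key_beq ['j','p'] acc,
      pv_key_beq ['c','n'] acc,
      pv_key_beq ['s','g'] acc,
      pv_key_beq ['a','u'] acc,
      pv_key_beq ['i','n'] acc,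
      pv_key_beq ['k','r'] acc,
      pv_key_beq ['h','k'] acc,
      pv_key_beq ['u','k'] acc,
      pv_key_beq ['c','a'] acc]
  by_cases h0 : ['u','s'] = acc
  · subst h0; rfl
  by_cases h1 : ['g','o','v'] = acc
  · subst h1; rfl
  by_cases h2 : ['m','i','l'] = acc
  · subst h2; rfl
  by_cases h3 : ['e','d','u'] = acc
  · subst h3; rfl
  by_cases h4 : ['f','r'] = acc
  · subst h4; rfl
  by_cases h5 : ['d','e'] = acc
  · subst h5; rfl
  by_cases h6 : ['e','s'] = acc
  · subst h6; rfl
  by_cases h7 : ['p','t'] = acc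
  · subst h7; rfl
  by_cases h8 : ['i','t'] = acc
  · subst h8; rfl
  by_cases h9 : ['i','e'] = acc
  · subst h9; rfl
  by_cases h10 : ['p','l'] = acc
  · subst h10; rfl
  by_cases h11 : ['n','l'] = acc
  · subst h11; rfl
  by_cases h12 : ['s','e'] = acc
  · subst h12; rfl
  by_cases h13 : ['n','o'] = acc
  · subst h13; rfl
  by_cases h14 : ['b','r'] = acc
  · subst h14; rfl
  by_cases h15 : ['m','x'] = acc
  · subst h15; rfl
  by_cases h16 : ['a','r'] = acc
  · subst h16; rfl
  by_cases h17 : ['c','l'] = acc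
  · subst h17; rfl
  by_cases h18 : ['p','e'] = acc
  · subst h18; rfl
  by_cases h19 : ['c','o'] = acc
  · subst h19; rfl
  by_cases h20 : ['j','p'] = acc
  · subst h20; rfl
  by_cases h21 : ['c','n'] = acc
  · subst h21; rfl
  by_cases h22 : ['s','g'] = acc
  · subst h22; rfl
  by_cases h23 : ['a','u'] = acc
  · subst h23; rfl
  by_cases h24 : ['i','n'] = acc
  · subst h24; rfl
  by_cases h25 : ['k','r'] = acc
  · subst h25; rfl
  by_cases h26 : ['h','k'] = acc
  · subst h26; rfl
  by_cases h27 : ['u','k'] = acc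
  · subst h27; rfl
  by_cases h28 : ['c','a'] = acc
  · subst h28; rfl
  simp [h0, h1, h2, h3, h4, h5, h6, h7, h8, h9, h10, h11, h12, h13, h14, h15, h16, h17, h18, h19, h20, h21, h22, h23, h24, h25, h26, h27, h28]

lemma pv_go_eq (r acc : List Char) (hacc : '.' ∉ acc) :
    pvAltGo r acc = pvChainA (r.reverse ++ acc) := by
  induction r generalizing acc with
  | nil =>
    simp only [pvAltGo, List.reverse_nil, List.nil_append]
    simp only [pvChainA, pvRegionHints, List.find?, List.any]
    rw [show (".us" : String).toList = '.'::['u','s'] from rfl,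
        show (".gov" : String).toList = '.'::['g','o','v'] from rfl,
        show (".mil" : String).toList = '.'::['m','i','l'] from rfl,
        show (".edu" : String).toList = '.'::['e','d','u'] from rfl,
        show (".fr" : String).toList = '.'::['f','r'] from rfl,
        show (".de" : String).toList = '.'::['d','e'] from rfl,
        show (".es" : String).toList = '.'::['e','s'] from rfl,
        show (".pt" : String).toList = '.'::['p','t'] from rfl,
        show (".it" : String).toList = '.'::['i','t'] from rfl,
        show (".ie" : String).toList = '.'::['i','e'] from rfl,
        show (".pl" : String).toList = '.'::['p','l'] from rfl,
        show (".nl" : String).toList = '.'::['n','l'] from rfl,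
        show (".se" : String).toList = '.'::['s','e'] from rfl,
        show (".no" : String).toList = '.'::['n','o'] from rfl,
        show (".br" : String).toList = '.'::['b','r'] from rfl,
        show (".mx" : String).toList = '.'::['m','x'] from rfl,
        show (".ar" : String).toList = '.'::['a','r'] from rfl,
        show (".cl" : String).toList = '.'::['c','l'] from rfl,
        show (".pe" : String).toList = '.'::['p','e'] from rfl,
        show (".co" : String).toList = '.'::['c','o'] from rfl,
        show (".jp" : String).toList = '.'::['j','p'] from rfl,
        show (".cn" : String).toList = '.'::['c','n'] from rfl,
        show (".sg" : String).toList = '.'::['s','g'] from rfl,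
        show (".au" : String).toList = '.'::['a','u'] from rfl,
        show (".in" : String).toList = '.'::['i','n'] from rfl,
        show (".kr" : String).toList = '.'::['k','r'] from rfl,
        show (".hk" : String).toList = '.'::['h','k'] from rfl]
    simp [pv_endswith_no_dot _ _ hacc]
  | cons c r' ih =>
    by_cases hc : c = '.'
    · subst hc
      simp only [pvAltGo, List.reverse_cons, List.append_assoc,
        List.singleton_append]
      exact (pv_dot_case r'.reverse acc hacc).symm
    · simp only [pvAltGo, if_neg hc, List.reverse_cons, List.append_assoc,
        List.singleton_append]
      exact ih (c :: acc) (by simp [hacc, Ne.symm, hc])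

-- ===== VERDICT (by name: the statement is the Claim_ definition above) =====
theorem guess_region_py_spec : Claim_equal_guess_region_py := by
  intro domain _
  unfold Spec_guess_region_py guess_region_py_alt
  rw [pvChainA_eq, pv_go_eq _ [] (by simp)]
  simp
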